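-- pv_equiv track=rewrite | github.com/santilaguna/IIC2233-2018-1-SantiRepo | Tareas/T04/funcion_tiempo.py | sumar_tiempo
-- ===== SOURCE A (Python) =====
-- def sumar_tiempo(tiempo_inical, tiempo_agregado):
--     """tiempo_inical: (int, int)
--     tiempo_agregado: (int, int)
--     retorna suma de tiempos: (int, int)"""
--     tiempo = (tiempo_inical[0] + tiempo_agregado[0],
--               tiempo_inical[1] + tiempo_agregado[1])
--     while tiempo[1] >= 60:
--         tiempo = (tiempo[0] + 1, tiempo[1] - 60)
--     if tiempo[0] > 23:
--         tiempo = (tiempo[0] - 24, tiempo[1])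
--     return tiempo
-- ===== SOURCE B (Python) =====
-- def sumar_tiempo(tiempo_inical, tiempo_agregado):
--     hora = tiempo_inical[0] + tiempo_agregado[0]
--     minuto = tiempo_inical[1] + tiempo_agregado[1]
--     if minuto >= 60:
--         carry, minuto = divmod(minuto, 60)
--         hora += carry
--     if hora > 23:
--         hora -= 24
--     return (hora, minuto)
-- ===== Notes on version B (the rewrite author's own statement) =====
-- stated objective: faster
-- what changed: Replaces A's minute-carry while loop (one iteration per 60 minutes) with a single guarded divmod closed form, keeping the single subtract-24 hour wrap.
import Mathlib
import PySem

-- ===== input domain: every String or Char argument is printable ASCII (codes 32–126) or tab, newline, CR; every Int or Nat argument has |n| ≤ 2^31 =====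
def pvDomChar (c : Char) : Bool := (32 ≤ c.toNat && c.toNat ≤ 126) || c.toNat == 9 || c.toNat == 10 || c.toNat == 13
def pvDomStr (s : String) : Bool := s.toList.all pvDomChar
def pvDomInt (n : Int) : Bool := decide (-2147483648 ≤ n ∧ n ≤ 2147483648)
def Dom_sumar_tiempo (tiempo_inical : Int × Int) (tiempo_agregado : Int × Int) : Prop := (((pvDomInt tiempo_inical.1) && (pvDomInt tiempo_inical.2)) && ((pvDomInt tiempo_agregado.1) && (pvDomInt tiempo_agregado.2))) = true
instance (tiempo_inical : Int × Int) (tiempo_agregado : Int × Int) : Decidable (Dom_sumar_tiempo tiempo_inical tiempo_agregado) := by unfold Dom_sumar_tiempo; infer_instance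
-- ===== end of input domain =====

-- B replaces A's per-60-minutes carry loop by one guarded divmod; same hour wrap (subtract 24 once).

-- ===== PORT A =====
-- the 'while tiempo[1] >= 60' loop, step for step
def sumarCarryLoop (tiempo : Int × Int) : Int × Int :=
  if _h : tiempo.2 ≥ 60 then sumarCarryLoop (tiempo.1 + 1, tiempo.2 - 60) else tiempo
termination_by tiempo.2.toNat
decreasing_by omega

def sumar_tiempo (tiempo_inical : Int × Int) (tiempo_agregado : Int × Int) : Int × Int :=
  let tiempo := (tiempo_inical.1 + tiempo_agregado.1, tiempo_inical.2 + tiempo_agregado.2)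
  let tiempo := sumarCarryLoop tiempo
  if tiempo.1 > 23 then (tiempo.1 - 24, tiempo.2) else tiempo

-- ===== PORT B =====
def sumar_tiempo_alt (tiempo_inical : Int × Int) (tiempo_agregado : Int × Int) : Int × Int :=
  let hora := tiempo_inical.1 + tiempo_agregado.1
  let minuto := tiempo_inical.2 + tiempo_agregado.2
  let hm : Int × Int :=
    if minuto ≥ 60 then (hora + PySem.Int.floordiv minuto 60, PySem.Int.mod minuto 60)
    else (hora, minuto)
  if hm.1 > 23 then (hm.1 - 24, hm.2) else hm

-- ===== PRECONDITION & SPEC =====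
def Spec_sumar_tiempo (tiempo_inical : Int × Int) (tiempo_agregado : Int × Int) (out : Int × Int) : Prop := out = sumar_tiempo_alt tiempo_inical tiempo_agregado
instance (tiempo_inical : Int × Int) (tiempo_agregado : Int × Int) (out : Int × Int) : Decidable (Spec_sumar_tiempo tiempo_inical tiempo_agregado out) := by unfold Spec_sumar_tiempo; infer_instance

-- ===== CLAIM (what is proved, stated in full; the proofs are below) =====
def Claim_equal_sumar_tiempo : Prop := ∀ (tiempo_inical : Int × Int) (tiempo_agregado : Int × Int), Dom_sumar_tiempo tiempo_inical tiempo_agregado → Spec_sumar_tiempo tiempo_inical tiempo_agregado (sumar_tiempo tiempo_inical tiempo_agregado)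

-- ===== LEMMAS AND PROOFS =====
theorem sumarCarryLoop_ediv (h m : Int) (hm : 60 ≤ m) :
    sumarCarryLoop (h, m) = (h + m / 60, m % 60) := by
  generalize hk : m.toNat = k
  induction k using Nat.strong_induction_on generalizing h m with
  | _ k ih =>
    unfold sumarCarryLoop
    simp only [ge_iff_le, hm, dif_pos]
    by_cases hm2 : 60 ≤ m - 60
    · have hk2 : (m - 60).toNat < k := by omega
      rw [ih _ hk2 (h + 1) (m - 60) hm2 rfl]
      have h60 : (m - 60) / 60 = m / 60 - 1 := by omega
      have h61 : (m - 60) % 60 = m % 60 := by omega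
      rw [h60, h61, Prod.mk.injEq]
      exact ⟨by ring, rfl⟩
    · unfold sumarCarryLoop
      simp only [ge_iff_le, hm2, dif_neg, not_false_iff]
      have h1 : m / 60 = 1 := by omega
      have h2 : m % 60 = m - 60 := by omega
      rw [h1, h2]

theorem sumarCarryLoop_eq (h m : Int) :
    sumarCarryLoop (h, m) =
      if 60 ≤ m then (h + PySem.Int.floordiv m 60, PySem.Int.mod m 60) else (h, m) := by
  by_cases hm : 60 ≤ m
  · rw [PySem.Int.floordiv_eq_ediv_of_pos (by omega), PySem.Int.mod_eq_emod_of_pos (by omega)]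
    simp only [hm, if_true]
    exact sumarCarryLoop_ediv h m hm
  · unfold sumarCarryLoop
    simp [hm]

-- ===== VERDICT (by name: the statement is the Claim_ definition above) =====
theorem sumar_tiempo_spec : Claim_equal_sumar_tiempo := by
  intro ti ta _
  unfold Spec_sumar_tiempo sumar_tiempo sumar_tiempo_alt
  simp only [sumarCarryLoop_eq, ge_iff_le]
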